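-- pv_equiv track=rewrite | github.com/napalm-automation-community/napalm-ruckus-fastiron | napalm_fastiron/FastIron.py | __creates_config_block
-- ===== SOURCE A (Python) =====
-- def __creates_config_block(list_1):
--     config_block = list()
--     temp_block = list()
--
--     for line_cmd in list_1:
--         cmd_position = list_1.index(line_cmd)
--         if cmd_position != 0:
--             if list_1[cmd_position - 1] == "!":
--                 while list_1[cmd_position] != "!" and cmd_position < len(list_1) - 1:
--                     temp_block.append(list_1[cmd_position])
--                     cmd_position += 1
--
--                 if len(temp_block) > 0:
--                     config_block.append(temp_block)
--                 temp_block = list()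
--
--     return config_block
-- ===== SOURCE B (Python) =====
-- def __creates_config_block(list_1):
--     n = len(list_1)
--     # first occurrence index of every value, built once (replaces list.index scans)
--     first = {}
--     for i, v in enumerate(list_1):
--         first.setdefault(v, i)
--     # the block starting at each candidate position, computed once per start
--     blocks = {}
--     for p in range(1, n):
--         if list_1[p - 1] == "!":
--             q = p
--             while q < n - 1 and list_1[q] != "!":
--                 q += 1
--             blocks[p] = list_1[p:q]
--     out = []
--     for v in list_1:
--         b = blocks.get(first[v])
--         if b:
--             out.append(b)
--     return out
-- ===== Notes on version B (the rewrite author's own statement) =====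
-- stated objective: faster
-- what changed: Replaces the per-element list.index scan and per-occurrence block re-collection with a first-occurrence dict built in one pass and blocks computed once per '!'-boundary start position, then looked up per element.
import Mathlib
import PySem

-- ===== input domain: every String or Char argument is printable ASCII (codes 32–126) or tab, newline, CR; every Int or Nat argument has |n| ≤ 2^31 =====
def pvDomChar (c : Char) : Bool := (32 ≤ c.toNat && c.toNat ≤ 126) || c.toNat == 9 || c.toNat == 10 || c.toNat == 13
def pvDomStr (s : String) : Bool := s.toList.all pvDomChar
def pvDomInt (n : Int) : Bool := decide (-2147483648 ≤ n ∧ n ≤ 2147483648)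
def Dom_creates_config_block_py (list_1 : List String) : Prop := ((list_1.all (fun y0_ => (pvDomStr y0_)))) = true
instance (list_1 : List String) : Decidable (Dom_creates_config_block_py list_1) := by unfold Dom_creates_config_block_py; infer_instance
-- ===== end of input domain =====

-- B replaces A's per-element list.index scan and per-occurrence block re-collection by a
-- first-occurrence dict and per-start memoized blocks (objective: faster, asymptotic).

-- ===== PORT A =====
-- A's inner while loop: while list_1[p] != "!" and p < len(list_1)-1: temp_block.append(list_1[p]); p += 1
-- (list_1[p] is always in range on reachable calls, so pyGetD's default is never taken)
def aCollect (l : List String) (p : Nat) (tb : List String) : List String :=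
  if PySem.List.pyGetD l (p : Int) "" ≠ "!" ∧ p < l.length - 1 then
    aCollect l (p + 1) (tb ++ [PySem.List.pyGetD l (p : Int) ""])
  else tb
termination_by l.length - p
decreasing_by rename_i h; omega

-- the body of A's for loop, on state (config_block, temp_block)
def aBody (list_1 : List String) (st : List (List String) × List String) (line_cmd : String) :
    List (List String) × List String :=
  -- list_1.index(line_cmd): line_cmd is drawn from list_1, so index? is always some
  let cmd_position := (PySem.List.index? list_1 line_cmd).getD 0
  if cmd_position ≠ 0 then
    if PySem.List.pyGetD list_1 ((cmd_position : Int) - 1) "" = "!" then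
      let tb := aCollect list_1 cmd_position st.2
      ((if tb.length > 0 then st.1 ++ [tb] else st.1), ([] : List String))
    else st
  else st

def creates_config_block_py (list_1 : List String) : List (List String) :=
  (list_1.foldl (aBody list_1) (([] : List (List String)), ([] : List String))).1

-- ===== PORT B =====
-- B's inner while: q = p; while q < n - 1 and list_1[q] != "!": q += 1
def bScan (l : List String) (q : Nat) : Nat :=
  if q < l.length - 1 ∧ PySem.List.pyGetD l (q : Int) "" ≠ "!" then bScan l (q + 1)
  else q
termination_by l.length - q
decreasing_by rename_i h; omega

-- first = {}; for i, v in enumerate(list_1): first.setdefault(v, i)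
def bFirst (list_1 : List String) : PySem.Dict String Int :=
  (PySem.List.enumerate list_1 0).foldl
    (fun d iv => d.setdefault iv.2 iv.1) PySem.Dict.empty

-- blocks = {}; for p in range(1, n): if list_1[p-1] == "!": (scan q) ; blocks[p] = list_1[p:q]
def bBlocks (list_1 : List String) : PySem.Dict Int (List String) :=
  (PySem.List.pyRange 1 (list_1.length : Int) 1).foldl
    (fun d p => if PySem.List.pyGetD list_1 (p - 1) "" = "!" then
        d.insert p (PySem.List.slice list_1 (some p) (some ((bScan list_1 p.toNat : Nat) : Int)))
      else d)
    PySem.Dict.empty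

def creates_config_block_py_alt (list_1 : List String) : List (List String) :=
  let first := bFirst list_1
  let blocks := bBlocks list_1
  -- out = []; for v in list_1: b = blocks.get(first[v]); if b: out.append(b)
  -- (first[v] never raises: v is drawn from list_1, so it is a key; getD's default is never taken)
  list_1.foldl (fun out v =>
      match blocks.get? (first.getD v 0) with
      | some b => if b ≠ [] then out ++ [b] else out
      | none => out) []

-- ===== PRECONDITION & SPEC =====
def Spec_creates_config_block_py (list_1 : List String) (out : List (List String)) : Prop := out = creates_config_block_py_alt list_1
instance (list_1 : List String) (out : List (List String)) : Decidable (Spec_creates_config_block_py list_1 out) := by unfold Spec_creates_config_block_py; infer_instance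

-- ===== CLAIM (what is proved, stated in full; the proofs are below) =====
def Claim_equal_creates_config_block_py : Prop := ∀ (list_1 : List String), Dom_creates_config_block_py list_1 → Spec_creates_config_block_py list_1 (creates_config_block_py list_1)

-- ===== LEMMAS AND PROOFS =====

-- per-element contribution of A's loop body
def fA (list_1 : List String) (v : String) : List (List String) :=
  let p := (PySem.List.index? list_1 v).getD 0
  if p ≠ 0 then
    if PySem.List.pyGetD list_1 ((p : Int) - 1) "" = "!" then
      let tb := aCollect list_1 p []
      if tb.length > 0 then [tb] else []
    else []
  else []

-- per-element contribution of B's output loop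
def gB (list_1 : List String) (v : String) : List (List String) :=
  match (bBlocks list_1).get? ((bFirst list_1).getD v 0) with
  | some b => if b ≠ [] then [b] else []
  | none => []

lemma a_step (list_1 : List String) (cb : List (List String)) (x : String) :
    aBody list_1 (cb, []) x = (cb ++ fA list_1 x, []) := by
  simp only [aBody, fA]
  split_ifs <;> simp

lemma a_loop (list_1 l : List String) (cb : List (List String)) :
    l.foldl (aBody list_1) (cb, ([] : List String)) = (cb ++ l.flatMap (fA list_1), []) := by
  induction l generalizing cb with
  | nil => simp
  | cons x xs ih =>
    rw [List.foldl_cons, a_step, ih]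
    simp

lemma b_loop (l : List String) (F : String → Option (List String)) (acc : List (List String)) :
    l.foldl (fun out v =>
      match F v with
      | some b => if b ≠ [] then out ++ [b] else out
      | none => out) acc
    = acc ++ l.flatMap (fun v => match F v with
      | some b => if b ≠ [] then [b] else []
      | none => []) := by
  induction l generalizing acc with
  | nil => simp
  | cons x xs ih =>
    simp only [List.foldl_cons, List.flatMap_cons]
    cases h : F x with
    | none => rw [ih]; simp [h]
    | some b =>
      by_cases hb : b ≠ [] <;> rw [ih] <;> simp [h, hb]

-- first-occurrence dict lookup equals index?
lemma first_get_aux (l : List String) (s : Int) (d : PySem.Dict String Int) (v : String) :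
    ((PySem.List.enumerate l s).foldl (fun d iv => d.setdefault iv.2 iv.1) d).get? v
    = (d.get? v).or ((PySem.List.index? l v).map (fun k => s + (k : Int))) := by
  induction l generalizing s d with
  | nil => simp [PySem.List.enumerate_nil, PySem.List.index?]
  | cons x xs ih =>
    rw [PySem.List.enumerate_cons, List.foldl_cons, ih]
    by_cases hv : v = x
    · subst hv
      rw [PySem.List.index?_cons_self, PySem.Dict.get?_setdefault_self]
      cases h : d.get? v <;> simp [h]
    · have hne : x ≠ v := fun h => hv h.symm
      rw [PySem.List.index?_cons_of_ne _ hne]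
      have hd : (d.setdefault x s).get? v = d.get? v := by
        by_cases hc : d.contains x
        · rw [PySem.Dict.setdefault_of_contains _ _ hc]
        · rw [PySem.Dict.setdefault_of_not_contains _ _ (by simpa using hc)]
          exact PySem.Dict.get?_insert_of_ne _ _ hv
      rw [hd]
      cases hi : PySem.List.index? xs v
      · simp [hi]
      · simp [hi]
        congr 1
        omega

lemma first_get (list_1 : List String) (v : String) :
    (bFirst list_1).get? v = (PySem.List.index? list_1 v).map (fun k => (k : Int)) := by
  unfold bFirst
  rw [first_get_aux]
  simp [PySem.Dict.get?_empty]

-- lookup in a dict built by conditional inserts keyed by the loop variable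
lemma blocks_get_aux (r : List Int) (c : Int → Prop) [DecidablePred c] (f : Int → List String)
    (d : PySem.Dict Int (List String)) (q : Int) :
    (r.foldl (fun d p => if c p then d.insert p (f p) else d) d).get? q
    = if q ∈ r ∧ c q then some (f q) else d.get? q := by
  induction r generalizing d with
  | nil => simp
  | cons p r ih =>
    simp only [List.foldl_cons]
    by_cases hcp : c p
    · rw [if_pos hcp, ih]
      by_cases hq : q ∈ r ∧ c q
      · rw [if_pos hq, if_pos ⟨List.mem_cons_of_mem _ hq.1, hq.2⟩]
      · rw [if_neg hq]
        by_cases hqp : q = p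
        · subst hqp
          rw [PySem.Dict.get?_insert_self, if_pos ⟨List.mem_cons_self, hcp⟩]
        · rw [PySem.Dict.get?_insert_of_ne _ _ hqp, if_neg]
          rintro ⟨hm, hc⟩
          rcases List.mem_cons.mp hm with h | h
          · exact hqp h
          · exact hq ⟨h, hc⟩
    · rw [if_neg hcp, ih]
      by_cases hq : q ∈ r ∧ c q
      · rw [if_pos hq, if_pos ⟨List.mem_cons_of_mem _ hq.1, hq.2⟩]
      · rw [if_neg hq, if_neg]
        rintro ⟨hm, hc⟩
        rcases List.mem_cons.mp hm with h | h
        · exact hcp (h ▸ hc)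
        · exact hq ⟨h, hc⟩

lemma blocks_get (list_1 : List String) (q : Int) :
    (bBlocks list_1).get? q
    = if (q ∈ PySem.List.pyRange 1 (list_1.length : Int) 1 ∧
          PySem.List.pyGetD list_1 (q - 1) "" = "!") then
        some (PySem.List.slice list_1 (some q) (some ((bScan list_1 q.toNat : Nat) : Int)))
      else none := by
  unfold bBlocks
  rw [blocks_get_aux (c := fun p => PySem.List.pyGetD list_1 (p - 1) "" = "!")
      (f := fun p => PySem.List.slice list_1 (some p) (some ((bScan list_1 p.toNat : Nat) : Int)))]
  simp [PySem.Dict.get?_empty]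

lemma bScan_ge (l : List String) (p : Nat) : p ≤ bScan l p := by
  unfold bScan
  split
  · have := bScan_ge l (p + 1)
    omega
  · exact le_refl p
termination_by l.length - p
decreasing_by rename_i h; omega

lemma aCollect_eq (l : List String) (p : Nat) (acc : List String) :
    aCollect l p acc = acc ++ (l.drop p).take (bScan l p - p) := by
  rw [aCollect, bScan]
  by_cases h : PySem.List.pyGetD l (p : Int) "" ≠ "!" ∧ p < l.length - 1
  · rw [if_pos h, if_pos ⟨h.2, h.1⟩, aCollect_eq l (p + 1)]
    have hge := bScan_ge l (p + 1)
    have hp : p < l.length := by omega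
    have hdrop : l.drop p = l[p] :: l.drop (p + 1) := List.drop_eq_getElem_cons hp
    have hget : PySem.List.pyGetD l (p : Int) "" = l[p] := by
      rw [PySem.List.pyGetD_natCast]
      simp [List.getD, hp]
    have hsub : bScan l (p + 1) - p = (bScan l (p + 1) - (p + 1)) + 1 := by omega
    rw [hdrop, hsub, List.take_succ_cons, hget]
    simp
  · rw [if_neg h, if_neg (fun hh => h ⟨hh.2, hh.1⟩)]
    simp
termination_by l.length - p
decreasing_by rename_i h; omega

lemma pointwise (list_1 : List String) (v : String) (hv : v ∈ list_1) :
    fA list_1 v = gB list_1 v := by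
  obtain ⟨k, hk⟩ := Option.isSome_iff_exists.mp ((PySem.List.index?_isSome_iff list_1 v).mpr hv)
  obtain ⟨hklt, hkv, -⟩ := PySem.List.getElem_of_index?_eq_some hk
  have hfirst : (bFirst list_1).getD v 0 = (k : Int) := by
    rw [PySem.Dict.getD_eq_get?_getD, first_get, hk]
    simp
  by_cases h0 : k ≠ 0
  · by_cases hbang : PySem.List.pyGetD list_1 ((k : Int) - 1) "" = "!"
    · have hblocks : (bBlocks list_1).get? ((k : Nat) : Int)
          = some ((list_1.drop k).take (bScan list_1 k - k)) := by
        rw [blocks_get,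
          if_pos ⟨PySem.List.mem_pyRange_one.mpr ⟨by omega, by exact_mod_cast hklt⟩, hbang⟩,
          Int.toNat_natCast, PySem.List.slice_natCast]
      unfold fA gB
      simp only [hfirst, hk, Option.getD_some, hblocks]
      rw [if_pos h0, if_pos hbang, aCollect_eq]
      simp only [List.nil_append]
      by_cases hne : (list_1.drop k).take (bScan list_1 k - k) = []
      · rw [if_neg (by simp [hne]), if_neg (by simp [hne])]
      · rw [if_pos (List.length_pos_iff.mpr hne), if_pos hne]
    · have hblocks : (bBlocks list_1).get? ((k : Nat) : Int) = none := by
        rw [blocks_get, if_neg (fun hh => hbang hh.2)]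
      unfold fA gB
      simp only [hfirst, hk, Option.getD_some, hblocks]
      rw [if_pos h0, if_neg hbang]
  · have hk0 : k = 0 := not_not.mp h0
    subst hk0
    have hblocks : (bBlocks list_1).get? ((0 : Nat) : Int) = none := by
      rw [blocks_get,
        if_neg (by rintro ⟨hm, -⟩; have := PySem.List.mem_pyRange_one.mp hm; omega)]
    unfold fA gB
    simp only [hfirst, hk, Option.getD_some, hblocks]
    simp

lemma a_eq (list_1 : List String) :
    creates_config_block_py list_1 = list_1.flatMap (fA list_1) := by
  unfold creates_config_block_py
  rw [a_loop]
  simp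

lemma b_eq (list_1 : List String) :
    creates_config_block_py_alt list_1 = list_1.flatMap (gB list_1) := by
  unfold creates_config_block_py_alt
  rw [b_loop list_1 (fun v => (bBlocks list_1).get? ((bFirst list_1).getD v 0))]
  simp only [List.nil_append]
  refine List.flatMap_congr (fun v _ => ?_)
  unfold gB
  rfl

-- ===== VERDICT (by name: the statement is the Claim_ definition above) =====
theorem creates_config_block_py_spec : Claim_equal_creates_config_block_py := by
  intro list_1 _
  unfold Spec_creates_config_block_py
  rw [a_eq, b_eq]
  exact List.flatMap_congr (fun v hv => pointwise list_1 v hv)
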